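-- pv_equiv track=rewrite | github.com/tyuhgf/singdistance | src/singdistance.py | splittings
-- ===== SOURCE A (Python) =====
-- def splittings(collection, ordered=True):
--     if len(collection) == 0:
--         yield [], []
--         return
--
--     for part1, part2 in splittings(collection[1:]):
--         yield [collection[0]] + part1, part2
--         if ordered:
--             yield part1, [collection[0]] + part2
-- ===== SOURCE B (Python) =====
-- def splittings(collection, ordered=True):
--     n = len(collection)
--     step = 1 if ordered else 2
--     for code in range(0, 2 ** n, step):
--         part1 = [x for i, x in enumerate(collection) if not (code >> i) & 1]
--         part2 = [x for i, x in enumerate(collection) if (code >> i) & 1]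
--         yield part1, part2
-- ===== Notes on version B (the rewrite author's own statement) =====
-- stated objective: idiomatic
-- what changed: Replaces A's recursive generator (recursing on the tail and doubling each tail split) by a direct non-recursive bitmask enumeration: code runs over range(0, 2**n) (step 2 when not ordered, pinning element 0 into part1), and bit i of code sends element i to part2.
import Mathlib
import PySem

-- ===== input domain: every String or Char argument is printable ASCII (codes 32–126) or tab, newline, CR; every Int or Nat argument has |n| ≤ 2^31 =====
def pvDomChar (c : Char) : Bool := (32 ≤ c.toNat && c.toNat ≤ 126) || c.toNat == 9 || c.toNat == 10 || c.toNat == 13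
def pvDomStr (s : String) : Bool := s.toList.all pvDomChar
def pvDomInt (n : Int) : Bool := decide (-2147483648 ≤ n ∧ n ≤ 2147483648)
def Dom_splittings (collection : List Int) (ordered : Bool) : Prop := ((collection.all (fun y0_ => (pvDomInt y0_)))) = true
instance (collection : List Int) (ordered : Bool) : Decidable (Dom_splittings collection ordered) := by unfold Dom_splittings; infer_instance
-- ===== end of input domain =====

-- B replaces A's recursion by a direct bitmask enumeration (code 0..2^n, bit i sends element i to part2; step 2 keeps element 0 in part1 when not ordered): idiomatic, non-recursive.

-- ===== PORT A =====
def splittings : List Int → Bool → List (List Int × List Int)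
  | [], _ => [([], [])]
  | x :: rest, ordered =>
      (splittings rest true).flatMap (fun p =>
        if ordered then [(x :: p.1, p.2), (p.1, x :: p.2)] else [(x :: p.1, p.2)])

-- ===== PORT B =====
-- (code >> i) & 1 == 1 ; exact for code ≥ 0 and i ≥ 0, the only values Source B uses
def pyBit (code i : Int) : Bool := code.toNat.testBit i.toNat

def splittings_alt (collection : List Int) (ordered : Bool) : List (List Int × List Int) :=
  let n := collection.length
  let step : Int := if ordered then 1 else 2
  (PySem.List.pyRange 0 ((2 : Int) ^ n) step).map (fun code =>
    (((PySem.List.enumerate collection).filter (fun p => ! pyBit code p.1)).map (·.2),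
     ((PySem.List.enumerate collection).filter (fun p => pyBit code p.1)).map (·.2)))

-- ===== PRECONDITION & SPEC =====
def Spec_splittings (collection : List Int) (ordered : Bool) (out : List (List Int × List Int)) : Prop := out = splittings_alt collection ordered
instance (collection : List Int) (ordered : Bool) (out : List (List Int × List Int)) : Decidable (Spec_splittings collection ordered out) := by unfold Spec_splittings; infer_instance

-- ===== CLAIM (what is proved, stated in full; the proofs are below) =====
def Claim_equal_splittings : Prop := ∀ (collection : List Int) (ordered : Bool), Dom_splittings collection ordered → Spec_splittings collection ordered (splittings collection ordered)

-- ===== LEMMAS AND PROOFS =====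

-- Nat-level reading of B's per-code part construction
def natParts : List Int → Nat → List Int × List Int
  | [], _ => ([], [])
  | x :: xs, c =>
      let p := natParts xs (c / 2)
      if c % 2 = 0 then (x :: p.1, p.2) else (p.1, x :: p.2)

def altParts (xs : List Int) (code : Int) : List Int × List Int :=
  (((PySem.List.enumerate xs).filter (fun p => ! pyBit code p.1)).map (·.2),
   ((PySem.List.enumerate xs).filter (fun p => pyBit code p.1)).map (·.2))

theorem enum_filter_map_shift (f g : Int → Bool) (hfg : ∀ i : Int, 0 ≤ i → g i = f (i + 1)) :
    ∀ (xs : List Int) (s : Int), 0 ≤ s →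
      ((PySem.List.enumerate xs (s + 1)).filter (fun p => f p.1)).map (·.2)
        = ((PySem.List.enumerate xs s).filter (fun p => g p.1)).map (·.2) := by
  intro xs
  induction xs with
  | nil => intro s hs; simp [PySem.List.enumerate_nil]
  | cons x xs ih =>
      intro s hs
      have htail := ih (s + 1) (by omega)
      rw [PySem.List.enumerate_cons, PySem.List.enumerate_cons]
      rw [List.filter_cons, List.filter_cons]
      simp only [hfg s hs]
      cases hg : f (s + 1) <;> simp [htail]

theorem pyBit_succ (c d : Nat) (hd : c / 2 = d) (i : Int) (hi : 0 ≤ i) :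
    pyBit (c : Int) (i + 1) = pyBit (d : Int) i := by
  unfold pyBit
  have h3 : (i + 1).toNat = i.toNat + 1 := by omega
  rw [Int.toNat_natCast, Int.toNat_natCast, h3, Nat.testBit_add_one, hd]

theorem pyBit_zero (c : Nat) : pyBit (c : Int) 0 = decide (c % 2 = 1) := by
  unfold pyBit
  rw [Int.toNat_natCast]
  simp [Nat.testBit_zero]

theorem altParts_eq_natParts (xs : List Int) : ∀ c : Nat, altParts xs (c : Int) = natParts xs c := by
  induction xs with
  | nil => intro c; simp [altParts, natParts, PySem.List.enumerate_nil]
  | cons x xs ih =>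
      intro c
      obtain ⟨d, hd⟩ : ∃ d, c / 2 = d := ⟨c / 2, rfl⟩
      have hs1 := enum_filter_map_shift (fun i => pyBit (c : Int) i) (fun i => pyBit (d : Int) i)
        (fun i hi => (pyBit_succ c d hd i hi).symm) xs 0 (by omega)
      have hs2 := enum_filter_map_shift (fun i => ! pyBit (c : Int) i) (fun i => ! pyBit (d : Int) i)
        (fun i hi => by have := pyBit_succ c d hd i hi; simp [this]) xs 0 (by omega)
      have hih := ih d
      unfold altParts at hih ⊢
      rw [PySem.List.enumerate_cons]
      rw [List.filter_cons, List.filter_cons]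
      by_cases hc : c % 2 = 0
      · have hb : pyBit (c : Int) 0 = false := by rw [pyBit_zero]; simp; omega
        simp only [natParts, hb, hc, if_pos, Bool.not_false, Bool.false_eq_true, reduceIte,
          List.map_cons, hd]
        rw [hs1, hs2, ← hih]
      · have hb : pyBit (c : Int) 0 = true := by rw [pyBit_zero]; simp; omega
        simp only [natParts, hb, hc, Bool.not_true, Bool.false_eq_true,
          reduceIte, List.map_cons, hd]
        rw [hs1, hs2, ← hih]

theorem pvRangeTwoMul (m : Nat) :
    List.range (2 * m) = (List.range m).flatMap (fun k => [2 * k, 2 * k + 1]) := by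
  induction m with
  | zero => simp
  | succ m ih =>
      have h : 2 * (m + 1) = (2 * m + 1) + 1 := by ring
      rw [h, List.range_succ, List.range_succ, List.range_succ, List.flatMap_append, ← ih]
      simp

theorem natParts_even (x : Int) (xs : List Int) (k : Nat) :
    natParts (x :: xs) (2 * k) = (x :: (natParts xs k).1, (natParts xs k).2) := by
  have h1 : 2 * k % 2 = 0 := by omega
  have h2 : 2 * k / 2 = k := by omega
  simp only [natParts, h1, h2, reduceIte]

theorem natParts_odd (x : Int) (xs : List Int) (k : Nat) :
    natParts (x :: xs) (2 * k + 1) = ((natParts xs k).1, x :: (natParts xs k).2) := by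
  have h1 : (2 * k + 1) % 2 = 1 := by omega
  have h2 : (2 * k + 1) / 2 = k := by omega
  simp only [natParts, h1, h2]
  simp

theorem main_true : ∀ xs : List Int,
    splittings xs true = (List.range (2 ^ xs.length)).map (fun c => natParts xs c) := by
  intro xs
  induction xs with
  | nil => simp [splittings, natParts]
  | cons x xs ih =>
      show (splittings xs true).flatMap _ = _
      rw [ih]
      have hlen : 2 ^ (x :: xs).length = 2 * 2 ^ xs.length := by
        rw [List.length_cons, pow_succ]; ring
      rw [hlen, pvRangeTwoMul, List.flatMap_map, List.map_flatMap]
      exact congrFun (congrArg List.flatMap (funext fun c => by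
        simp [natParts_even, natParts_odd])) (List.range (2 ^ xs.length))

theorem alt_true (xs : List Int) :
    splittings_alt xs true = (List.range (2 ^ xs.length)).map (fun c => natParts xs c) := by
  unfold splittings_alt
  simp only [if_true]
  rw [PySem.List.pyRange_one]
  have h : ((2 : Int) ^ xs.length - 0).toNat = 2 ^ xs.length := by
    have h1 : (2 : Int) ^ xs.length - 0 = ((2 ^ xs.length : Nat) : Int) := by push_cast; ring
    rw [h1, Int.toNat_natCast]
  rw [h, List.map_map]
  apply List.map_congr_left
  intro k _
  show altParts xs (0 + (k : Int)) = natParts xs k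
  have h0 : (0 : Int) + (k : Int) = ((k : Nat) : Int) := by push_cast; ring
  rw [h0, altParts_eq_natParts]

theorem int_half (m : Nat) : ((2 : Int) * m + 1) / 2 = m := by omega

theorem alt_false_cons (x : Int) (xs : List Int) :
    splittings_alt (x :: xs) false
      = (List.range (2 ^ xs.length)).map (fun c => (x :: (natParts xs c).1, (natParts xs c).2)) := by
  unfold splittings_alt
  simp only [Bool.false_eq_true, if_false]
  rw [PySem.List.pyRange_of_pos 0 _ (by norm_num : (0 : Int) < 2)]
  have hb : (0 : Int) < (2 : Int) ^ (x :: xs).length := by positivity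
  rw [if_pos hb]
  have hm : (2 : Int) ^ xs.length = ((2 ^ xs.length : Nat) : Int) := by push_cast; ring
  have hcount : (((2 : Int) ^ (x :: xs).length - 0 + 2 - 1) / 2).toNat = 2 ^ xs.length := by
    have hx : (2 : Int) ^ (x :: xs).length - 0 + 2 - 1
        = 2 * ((2 ^ xs.length : Nat) : Int) + 1 := by
      rw [List.length_cons, pow_succ, hm]; ring
    rw [hx, int_half, Int.toNat_natCast]
  rw [hcount, List.map_map]
  apply List.map_congr_left
  intro k _
  show altParts (x :: xs) (0 + 2 * (k : Int)) = (x :: (natParts xs k).1, (natParts xs k).2)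
  have h0 : (0 : Int) + 2 * (k : Int) = ((2 * k : Nat) : Int) := by push_cast; ring
  rw [h0, altParts_eq_natParts, natParts_even]

theorem main_false_cons (x : Int) (xs : List Int) :
    splittings (x :: xs) false
      = (List.range (2 ^ xs.length)).map (fun c => (x :: (natParts xs c).1, (natParts xs c).2)) := by
  show (splittings xs true).flatMap _ = _
  rw [main_true, List.flatMap_map]
  simp only [Bool.false_eq_true, reduceIte]
  exact (List.map_eq_flatMap).symm

-- ===== VERDICT (by name: the statement is the Claim_ definition above) =====
theorem splittings_spec : Claim_equal_splittings := by
  intro collection ordered _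
  unfold Spec_splittings
  cases ordered with
  | true => rw [main_true, alt_true]
  | false =>
      cases collection with
      | nil => decide
      | cons x xs => rw [main_false_cons, alt_false_cons]
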